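-- pv_equiv track=rewrite | github.com/E-Kohei/Othello | base81.py | toBase81
-- ===== SOURCE A (Python) =====
-- from string import printable
--
-- DIGITS = list(printable)[:81]
--
-- def toBase81Digit(d):
--     if 0 <= d <= 80:
--         return DIGITS[d]
--     else:
--         raise ValueError("This number cannot be interpretted as a digit of base81")
--
-- def toBase81(n):
--     result = toBase81Digit(n % 81)
--     n = n // 81
--     while n:
--         d = n % 81
--         result += toBase81Digit(d)
--         n = n // 81
--     return result[::-1]
-- ===== SOURCE B (Python) =====
-- from string import printable
--
-- DIGITS = list(printable)[:81]
--
-- def toBase81(n):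
--     # count digits, then index each one directly via powers of 81 (no reversal, no append)
--     k = 1
--     while 81 ** k <= n:
--         k += 1
--     return ''.join(DIGITS[(n // 81 ** i) % 81] for i in range(k - 1, -1, -1))
-- ===== Notes on version B (the rewrite author's own statement) =====
-- stated objective: alternative
-- what changed: Replaces the append-then-reverse while-loop with a two-stage positional method: first count the digits with a power comparison, then emit each digit most-significant-first by direct power-of-81 division, so no accumulator and no final [::-1].
-- outside the precondition, e.g. on toBase81(-1): A does not finish within the time limit, B returns '='
import Mathlib
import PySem

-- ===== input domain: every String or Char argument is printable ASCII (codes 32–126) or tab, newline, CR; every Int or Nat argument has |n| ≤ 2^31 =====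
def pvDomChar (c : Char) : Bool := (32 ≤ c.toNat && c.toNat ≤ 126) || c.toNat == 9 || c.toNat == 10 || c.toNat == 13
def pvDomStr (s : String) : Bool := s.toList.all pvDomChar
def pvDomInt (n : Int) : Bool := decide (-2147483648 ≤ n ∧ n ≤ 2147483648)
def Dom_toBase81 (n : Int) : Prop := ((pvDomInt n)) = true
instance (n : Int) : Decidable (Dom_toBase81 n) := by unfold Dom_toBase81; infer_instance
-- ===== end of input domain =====

-- B replaces A's append-then-reverse while-loop by a two-stage positional method
-- (count the digits, then index each digit most-significant-first via powers of 81);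
-- objective: alternative — no accumulator, no final reversal.
-- Pre_ restricts to 0 ≤ n: on negative n the Python A never terminates (n // 81 stays negative).

-- ===== PORT A =====
-- DIGITS = list(printable)[:81]
def pvDigits : List Char := "0123456789abcdefghijklmnopqrstuvwxyzABCDEFGHIJKLMNOPQRSTUVWXYZ!\"#$%&'()*+,-./:;<=".toList

-- toBase81Digit: raises ValueError outside 0..80; the '?' branch is never reached by either
-- port inside Pre_ (every argument passed is a value of `mod · 81`, hence in 0..80).
def pvDigit (d : Int) : Char :=
  if 0 ≤ d ∧ d ≤ 80 then pvDigits.getD d.toNat '?' else '?'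

-- the while-loop of A, on the accumulated list of chars; the guard `0 < n` coincides with
-- Python's `while n:` for every input admitted by Pre_ (for n < 0 the Python loop diverges).
def pvLoopA (n : Int) (result : List Char) : List Char :=
  if _h : 0 < n then
    pvLoopA (PySem.Int.floordiv n 81) (result ++ [pvDigit (PySem.Int.mod n 81)])
  else result
termination_by n.toNat
decreasing_by
  have : PySem.Int.floordiv n 81 = n / 81 := PySem.Int.floordiv_eq_ediv_of_pos (by omega)
  rw [this]; omega

def toBase81 (n : Int) : String :=
  String.ofList ((pvLoopA (PySem.Int.floordiv n 81) [pvDigit (PySem.Int.mod n 81)]).reverse)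

-- ===== PORT B =====
-- the `while 81 ** k <= n: k += 1` digit-counting loop of Source B
def pvCountDigits (n : Int) (k : Nat) : Nat :=
  if _h : (81 : Int) ^ k ≤ n then pvCountDigits n (k + 1) else k
termination_by n.toNat + 1 - 81 ^ k
decreasing_by
  have hnn : (0 : Int) ≤ n := le_trans (by positivity) _h
  have h1 : (81 : Nat) ^ k ≤ n.toNat := (Int.le_toNat hnn).mpr (by exact_mod_cast _h)
  have h2 : (81 : Nat) ^ k < 81 ^ (k + 1) := Nat.pow_lt_pow_succ (by norm_num)
  omega

-- ''.join(DIGITS[(n // 81 ** i) % 81] for i in range(k - 1, -1, -1))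
def toBase81_alt (n : Int) : String :=
  String.ofList (((List.range (pvCountDigits n 1)).reverse).map
    (fun i => pvDigit (PySem.Int.mod (PySem.Int.floordiv n ((81 : Int) ^ i)) 81)))

-- ===== PRECONDITION & SPEC =====
-- Pre_ excludes negative n: there Python A loops forever (never returns) while B returns a value.
def Pre_toBase81 (n : Int) : Prop := 0 ≤ n
instance (n : Int) : Decidable (Pre_toBase81 n) := by unfold Pre_toBase81; infer_instance
def pvWitness_toBase81 : Int := (12345)

def Spec_toBase81 (n : Int) (out : String) : Prop := out = toBase81_alt n
instance (n : Int) (out : String) : Decidable (Spec_toBase81 n out) := by unfold Spec_toBase81; infer_instance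

-- ===== CLAIM (what is proved, stated in full; the proofs are below) =====
def Claim_equal_toBase81 : Prop := ∀ (n : Int), Dom_toBase81 n → Pre_toBase81 n → Spec_toBase81 n (toBase81 n)

-- ===== LEMMAS AND PROOFS =====

-- A's loop only appends: running it on accumulator r prepends r to its run on [].
theorem pvLoopA_eq (n : Int) (r : List Char) : pvLoopA n r = r ++ pvLoopA n [] := by
  by_cases h : 0 < n
  · conv_lhs => rw [pvLoopA]
    conv_rhs => rw [pvLoopA]
    rw [dif_pos h, dif_pos h,
        pvLoopA_eq (PySem.Int.floordiv n 81) (r ++ [pvDigit (PySem.Int.mod n 81)]),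
        pvLoopA_eq (PySem.Int.floordiv n 81) ([] ++ [pvDigit (PySem.Int.mod n 81)])]
    simp
  · conv_lhs => rw [pvLoopA]
    conv_rhs => rw [pvLoopA]
    rw [dif_neg h, dif_neg h]; simp
termination_by n.toNat
decreasing_by
  all_goals
    have : PySem.Int.floordiv n 81 = n / 81 := PySem.Int.floordiv_eq_ediv_of_pos (by omega)
    rw [this]; omega

-- shifting the counting loop's accumulator corresponds to dividing n by 81.
theorem pvCount_shift (n : Int) (k : Nat) (hn : 0 ≤ n) :
    pvCountDigits n (k + 1) = pvCountDigits (n / 81) k + 1 := by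
  have hiff : ((81 : Int) ^ (k + 1) ≤ n) ↔ ((81 : Int) ^ k ≤ n / 81) := by
    rw [Int.le_ediv_iff_mul_le (by norm_num), ← pow_succ]
  conv_lhs => rw [pvCountDigits]
  conv_rhs => rw [pvCountDigits]
  by_cases h : (81 : Int) ^ (k + 1) ≤ n
  · rw [dif_pos h, dif_pos (hiff.mp h), pvCount_shift n (k + 1) hn]
  · rw [dif_neg h, dif_neg (fun hc => h (hiff.mpr hc))]
termination_by n.toNat + 1 - 81 ^ (k + 1)
decreasing_by
  have hnn : (0 : Int) ≤ n := le_trans (by positivity) h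
  have h1 : (81 : Nat) ^ (k + 1) ≤ n.toNat := (Int.le_toNat hnn).mpr (by exact_mod_cast h)
  have h2 : (81 : Nat) ^ (k + 1) < 81 ^ (k + 1 + 1) := Nat.pow_lt_pow_succ (by norm_num)
  omega

-- key invariant: A's digit list (least-significant first) is B's positional digit list.
theorem pvMain (n : Int) (hn : 0 ≤ n) :
    pvDigit (PySem.Int.mod n 81) :: pvLoopA (PySem.Int.floordiv n 81) []
      = (List.range (pvCountDigits n 1)).map
          (fun i => pvDigit (PySem.Int.mod (PySem.Int.floordiv n ((81 : Int) ^ i)) 81)) := by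
  have hfd : PySem.Int.floordiv n 81 = n / 81 := PySem.Int.floordiv_eq_ediv_of_pos (by norm_num)
  by_cases hlt : n < 81
  · have hk : pvCountDigits n 1 = 1 := by
      rw [pvCountDigits, dif_neg (by simpa using hlt.not_ge)]
    have hfd0 : n / 81 = 0 := Int.ediv_eq_zero_of_lt hn hlt
    rw [hk, hfd, hfd0, pvLoopA]
    simp
  · -- n ≥ 81
    have hm : 0 < n / 81 := by
      have : (1 : Int) ≤ n / 81 := by
        rw [Int.le_ediv_iff_mul_le (by norm_num)]; omega
      omega
    have hk0 : pvCountDigits (n / 81) 0 = pvCountDigits (n / 81) 1 := by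
      conv_lhs => rw [pvCountDigits]
      rw [dif_pos (by simpa using hm)]
    have hk1 : pvCountDigits n 1 = pvCountDigits (n / 81) 1 + 1 := by
      rw [pvCount_shift n 0 hn, hk0]
    have hloop : pvLoopA (n / 81) []
        = pvDigit (PySem.Int.mod (n / 81) 81) :: pvLoopA (PySem.Int.floordiv (n / 81) 81) [] := by
      rw [pvLoopA, dif_pos hm, pvLoopA_eq]; simp
    have ih := pvMain (n / 81) (by omega)
    rw [hfd, hloop, ih, hk1, List.range_succ_eq_map, List.map_cons, List.map_map]
    congr 1
    · congr 1
      rw [pow_zero, PySem.Int.floordiv_eq_ediv_of_pos (by norm_num), Int.ediv_one]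
    · apply List.map_congr_left
      intro i _
      have h2 : n / 81 / (81 : Int) ^ i = n / (81 : Int) ^ (i + 1) := by
        rw [pow_succ', Int.ediv_ediv_of_nonneg (by norm_num)]
      simp [Function.comp]
      rw [h2]
termination_by n.toNat
decreasing_by omega

-- ===== VERDICT (by name: the statement is the Claim_ definition above) =====
theorem toBase81_spec : Claim_equal_toBase81 := by
  intro n _ hn
  show toBase81 n = toBase81_alt n
  unfold toBase81 toBase81_alt
  rw [pvLoopA_eq, show ([pvDigit (PySem.Int.mod n 81)] ++ pvLoopA (PySem.Int.floordiv n 81) [])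
        = pvDigit (PySem.Int.mod n 81) :: pvLoopA (PySem.Int.floordiv n 81) [] from rfl,
      pvMain n hn, List.map_reverse]
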